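-- pv_equiv track=rewrite | github.com/LordNydorf/LeetCode | Remove Letter to Equalize Frequency.py | equalFrequency
-- ===== SOURCE A (Python) =====
-- def equalFrequency(word: str) -> bool:
--     def all_equal(lst):
--         return not lst or [lst[0]] * len(lst) == lst
--     hash = {}
--     for letter in word:
--         hash.setdefault(letter, 0)
--         hash[letter] += 1
--     vals = list(hash.values())
--     for i in range(len(vals)):
--         vals = list(hash.values())
--         vals[i] -= 1
--         if vals[i] == 0:
--             vals.pop(i)
--         if all_equal(vals):
--             return True
--     return False
-- ===== SOURCE B (Python) =====
-- def equalFrequency(word: str) -> bool: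
--     freq = {}
--     for ch in word:
--         freq[ch] = freq.get(ch, 0) + 1
--     vals = list(freq.values())
--     n = len(vals)
--     if n == 0:
--         return False
--     s = sum(vals)
--     mn = min(vals)
--     mx = max(vals)
--     return (mn == mx and (mn == 1 or n == 1)) \
--         or (mn == 1 and s - 1 == mx * (n - 1)) \
--         or (mx == mn + 1 and s == mx + mn * (n - 1))
-- ===== Notes on version B (the rewrite author's own statement) =====
-- stated objective: alternative
-- what changed: A tries every distinct letter, rebuilding the frequency list and checking all-equal after each simulated removal (O(k^2) in the number k of distinct letters); B replaces the trial loop by a closed-form arithmetic test on sum, min, max and length of the frequency list, winning iff all frequencies are equal with value 1 or count 1, or one single letter of frequency 1 can be dropped, or one letter exceeds the common frequency by exactly 1.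
import Mathlib
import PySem

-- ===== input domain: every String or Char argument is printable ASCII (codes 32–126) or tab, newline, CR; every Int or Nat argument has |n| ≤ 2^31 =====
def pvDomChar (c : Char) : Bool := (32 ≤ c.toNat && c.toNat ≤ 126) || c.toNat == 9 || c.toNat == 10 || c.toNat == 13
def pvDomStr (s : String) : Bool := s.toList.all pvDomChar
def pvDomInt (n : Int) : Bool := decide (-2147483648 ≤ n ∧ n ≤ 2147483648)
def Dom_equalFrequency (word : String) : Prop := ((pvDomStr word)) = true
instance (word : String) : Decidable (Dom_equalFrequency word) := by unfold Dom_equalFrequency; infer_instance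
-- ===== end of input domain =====

-- B replaces A's per-letter removal-trial loop by a closed-form arithmetic test on the
-- sum/min/max/length of the frequency list; objective: alternative (different algorithm).

-- ===== PORT A =====
-- helper 'all_equal(lst)': 'not lst or [lst[0]] * len(lst) == lst'
def pvAllEqualA (lst : List Int) : Bool :=
  lst.isEmpty || (List.replicate lst.length lst.headI == lst)

def equalFrequency (word : String) : Bool :=
  let hash := word.toList.foldl
    (fun h letter =>
      let h := h.setdefault letter (0 : Int)       -- hash.setdefault(letter, 0)
      h.insert letter (h.getD letter 0 + 1))       -- hash[letter] += 1
    PySem.Dict.empty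
  let vals := hash.values
  -- 'for i in range(len(vals))' with an early 'return True' is List.any over the indices;
  -- every index i is in range, so List.getD / List.set / List.eraseIdx are exact for
  -- 'vals[i]', 'vals[i] -= 1' and 'vals.pop(i)'.
  (List.range vals.length).any fun i =>
    let vals := hash.values
    let vals := vals.set i (vals.getD i 0 - 1)
    let vals := if vals.getD i 0 == 0 then vals.eraseIdx i else vals
    pvAllEqualA vals

-- ===== PORT B =====
def equalFrequency_alt (word : String) : Bool :=
  let freq := word.toList.foldl
    (fun h ch => h.insert ch (h.getD ch (0 : Int) + 1)) PySem.Dict.empty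
  let vals := freq.values
  let n : Int := vals.length
  if n == 0 then false
  else
    let s := vals.sum
    let mn := (PySem.List.min? vals (fun x => x)).getD 0   -- min(vals): nonempty after the n == 0 guard
    let mx := (PySem.List.max? vals (fun x => x)).getD 0   -- max(vals)
    ((mn == mx) && (mn == 1 || n == 1)) ||
    ((mn == 1) && (s - 1 == mx * (n - 1))) ||
    ((mx == mn + 1) && (s == mx + mn * (n - 1)))

-- ===== PRECONDITION & SPEC =====
def Spec_equalFrequency (word : String) (out : Bool) : Prop := out = equalFrequency_alt word
instance (word : String) (out : Bool) : Decidable (Spec_equalFrequency word out) := by unfold Spec_equalFrequency; infer_instance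

-- ===== CLAIM (what is proved, stated in full; the proofs are below) =====
def Claim_equal_equalFrequency : Prop := ∀ (word : String), Dom_equalFrequency word → Spec_equalFrequency word (equalFrequency word)

-- ===== LEMMAS AND PROOFS =====

-- The body of A's trial for index i: vals[i] -= 1, pop the entry if it became zero.
def pvModA (l : List Int) (i : Nat) : List Int :=
  if (l.set i (l.getD i 0 - 1)).getD i 0 == 0 then (l.set i (l.getD i 0 - 1)).eraseIdx i
  else l.set i (l.getD i 0 - 1)

-- 'all elements equal' as a Prop.
def pvAllEq (t : List Int) : Prop := ∀ x ∈ t, ∀ y ∈ t, x = y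

lemma pvAllEqualA_iff (t : List Int) : pvAllEqualA t = true ↔ pvAllEq t := by
  cases t with
  | nil => simp [pvAllEqualA, pvAllEq]
  | cons x r =>
    simp only [pvAllEqualA, List.isEmpty_cons, Bool.false_or, beq_iff_eq, List.headI]
    constructor
    · intro h a ha b hb
      have h2 := (List.eq_replicate_iff.mp h.symm).2
      rw [h2 a ha, h2 b hb]
    · intro h
      symm
      refine List.eq_replicate_iff.mpr ⟨rfl, ?_⟩
      intro b hb
      exact h b hb x List.mem_cons_self

lemma pv_allEq_const (t : List Int) (c : Int) (h : ∀ y ∈ t, y = c) : pvAllEq t :=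
  fun x hx y hy => (h x hx).trans (h y hy).symm

lemma pv_sum_of_all_eq (t : List Int) (c : Int) (h : ∀ x ∈ t, x = c) :
    t.sum = c * t.length := by
  induction t with
  | nil => simp
  | cons a r ih =>
    have ha : a = c := h a List.mem_cons_self
    have hr := ih (fun x hx => h x (List.mem_cons_of_mem _ hx))
    simp only [List.sum_cons, List.length_cons, hr, ha]
    push_cast
    ring

lemma pv_sum_le (t : List Int) (c : Int) (h : ∀ x ∈ t, x ≤ c) :
    t.sum ≤ c * t.length := by
  induction t with
  | nil => simp
  | cons a r ih =>
    have ha : a ≤ c := h a List.mem_cons_self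
    have hr := ih (fun x hx => h x (List.mem_cons_of_mem _ hx))
    simp only [List.sum_cons, List.length_cons]
    push_cast
    nlinarith [hr, ha]

lemma pv_sum_ge (t : List Int) (c : Int) (h : ∀ x ∈ t, c ≤ x) :
    c * t.length ≤ t.sum := by
  induction t with
  | nil => simp
  | cons a r ih =>
    have ha : c ≤ a := h a List.mem_cons_self
    have hr := ih (fun x hx => h x (List.mem_cons_of_mem _ hx))
    simp only [List.sum_cons, List.length_cons]
    push_cast
    nlinarith [hr, ha]

lemma pv_all_eq_of_le (t : List Int) (c : Int) (h : ∀ x ∈ t, x ≤ c)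
    (hs : t.sum = c * t.length) : ∀ x ∈ t, x = c := by
  induction t with
  | nil => simp
  | cons a r ih =>
    have ha : a ≤ c := h a List.mem_cons_self
    have hb : ∀ x ∈ r, x ≤ c := fun x hx => h x (List.mem_cons_of_mem _ hx)
    have hr := pv_sum_le r c hb
    simp only [List.sum_cons, List.length_cons] at hs
    push_cast at hs
    have ha' : a = c := by nlinarith
    have hs' : r.sum = c * r.length := by nlinarith
    intro x hx
    rcases List.mem_cons.mp hx with rfl | hx
    · exact ha'
    · exact ih hb hs' x hx

lemma pv_all_eq_of_ge (t : List Int) (c : Int) (h : ∀ x ∈ t, c ≤ x)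
    (hs : t.sum = c * t.length) : ∀ x ∈ t, x = c := by
  induction t with
  | nil => simp
  | cons a r ih =>
    have ha : c ≤ a := h a List.mem_cons_self
    have hb : ∀ x ∈ r, c ≤ x := fun x hx => h x (List.mem_cons_of_mem _ hx)
    have hr := pv_sum_ge r c hb
    simp only [List.sum_cons, List.length_cons] at hs
    push_cast at hs
    have ha' : a = c := by nlinarith
    have hs' : r.sum = c * r.length := by nlinarith
    intro x hx
    rcases List.mem_cons.mp hx with rfl | hx
    · exact ha'
    · exact ih hb hs' x hx

-- A's dict-building step (setdefault then +=1) equals B's (get-with-default then insert).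
lemma pv_step_eq (h : PySem.Dict Char Int) (c : Char) :
    (h.setdefault c 0).insert c ((h.setdefault c 0).getD c 0 + 1)
      = h.insert c (h.getD c 0 + 1) := by
  by_cases hc : h.contains c = true
  · rw [PySem.Dict.setdefault_of_contains h 0 hc]
  · have hc' : h.contains c = false := by simpa using hc
    rw [PySem.Dict.setdefault_of_not_contains h 0 hc',
        PySem.Dict.getD_insert_self, PySem.Dict.insert_insert_self,
        PySem.Dict.getD_of_not_contains h 0 hc']

lemma pv_values_counter (l : List Char) :
    (PySem.Dict.counter l).values
      = (PySem.Set.ofList l).map (fun k => ((List.count k l : Nat) : Int)) := by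
  rw [PySem.Dict.values_eq_map_keys _ (PySem.Dict.nodup_keys_counter l) 0,
      PySem.Dict.keys_counter]
  exact List.map_congr_left (fun k _ => PySem.Dict.getD_counter l k)

lemma pv_vals_pos (l : List Char) :
    ∀ x ∈ (PySem.Dict.counter l).values, (1 : Int) ≤ x := by
  rw [pv_values_counter]
  intro x hx
  obtain ⟨k, hk, rfl⟩ := List.mem_map.mp hx
  have hkl : k ∈ l := (PySem.Set.mem_ofList l k).mp hk
  have h1 : 1 ≤ List.count k l := List.one_le_count_iff.mpr hkl
  exact_mod_cast h1

lemma pv_eraseIdx_append (t1 t2 : List Int) (x : Int) :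
    (t1 ++ x :: t2).eraseIdx t1.length = t1 ++ t2 := by
  induction t1 with
  | nil => rfl
  | cons a r ih => simp [ih]

lemma pv_getD_append (t1 t2 : List Int) (x : Int) :
    (t1 ++ x :: t2).getD t1.length 0 = x := by
  induction t1 with
  | nil => rfl
  | cons a r _ih => simp

lemma pv_decomp (l : List Int) (i : Nat) (h : i < l.length) :
    l = l.take i ++ l[i] :: l.drop (i + 1) := by
  conv_lhs => rw [← List.take_append_drop i l, List.drop_eq_getElem_cons h]

lemma pv_take_len (l : List Int) (i : Nat) (h : i < l.length) :
    (l.take i).length = i := by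
  simp [List.length_take]
  omega

lemma pv_modA_erase (l : List Int) (i : Nat) (h : i < l.length) (h1 : l[i] = 1) :
    pvModA l i = l.take i ++ l.drop (i + 1) := by
  have hti := pv_take_len l i h
  have hset : l.set i (l.getD i 0 - 1) = l.take i ++ (0 : Int) :: l.drop (i + 1) := by
    rw [List.set_eq_take_cons_drop _ h, List.getD_eq_getElem l 0 h, h1]
    norm_num
  have hg : (l.take i ++ (0 : Int) :: l.drop (i + 1)).getD i 0 = 0 := by
    have h0 := pv_getD_append (l.take i) (l.drop (i + 1)) 0
    rwa [hti] at h0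
  have he : (l.take i ++ (0 : Int) :: l.drop (i + 1)).eraseIdx i = l.take i ++ l.drop (i + 1) := by
    have h0 := pv_eraseIdx_append (l.take i) (l.drop (i + 1)) 0
    rwa [hti] at h0
  unfold pvModA
  rw [hset, hg]
  simp only [beq_self_eq_true, if_true]
  exact he

lemma pv_modA_set (l : List Int) (i : Nat) (h : i < l.length) (h1 : l[i] ≠ 1) :
    pvModA l i = l.take i ++ (l[i] - 1) :: l.drop (i + 1) := by
  have hti := pv_take_len l i h
  have hset : l.set i (l.getD i 0 - 1) = l.take i ++ (l[i] - 1) :: l.drop (i + 1) := by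
    rw [List.set_eq_take_cons_drop _ h, List.getD_eq_getElem l 0 h]
  have hg : (l.take i ++ (l[i] - 1) :: l.drop (i + 1)).getD i 0 = l[i] - 1 := by
    have h0 := pv_getD_append (l.take i) (l.drop (i + 1)) (l[i] - 1)
    rwa [hti] at h0
  unfold pvModA
  rw [hset, hg]
  have : ((l[i] - 1 : Int) == 0) = false := by
    simp only [beq_eq_false_iff_ne, ne_eq, sub_eq_zero]
    exact h1
  rw [this]
  simp

lemma pv_mem_parts (l : List Int) (i : Nat) (_h : i < l.length) {y : Int}
    (hy : y ∈ l.take i ++ l.drop (i + 1)) : y ∈ l := by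
  rcases List.mem_append.mp hy with h' | h'
  · exact List.mem_of_mem_take h'
  · exact List.mem_of_mem_drop h'

lemma pv_sum_decomp (l : List Int) (i : Nat) (h : i < l.length) :
    l.sum = (l.take i ++ l.drop (i + 1)).sum + l[i] := by
  have h0 := congrArg List.sum (pv_decomp l i h)
  rw [List.sum_append, List.sum_cons] at h0
  rw [List.sum_append]
  linarith [h0]

lemma pv_len_decomp (l : List Int) (i : Nat) (h : i < l.length) :
    (l.take i ++ l.drop (i + 1)).length + 1 = l.length := by
  conv_rhs => rw [pv_decomp l i h]
  simp [List.length_append]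
  omega

-- Forward: a successful trial at index i implies B's closed-form condition.
lemma pv_core_fwd (l : List Int) (hpos : ∀ x ∈ l, (1 : Int) ≤ x) (m M : Int)
    (hm : PySem.List.min? l (fun x => x) = some m)
    (hM : PySem.List.max? l (fun x => x) = some M)
    (i : Nat) (hi : i < l.length) (hEq : pvAllEq (pvModA l i)) :
    ((m = M ∧ (m = 1 ∨ (l.length : Int) = 1)) ∨
     (m = 1 ∧ l.sum - 1 = M * ((l.length : Int) - 1)) ∨
     (M = m + 1 ∧ l.sum = M + m * ((l.length : Int) - 1))) := by
  have hmmem : m ∈ l := PySem.List.min?_mem hm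
  have hMmem : M ∈ l := PySem.List.max?_mem hM
  have hmle : ∀ y ∈ l, m ≤ y := PySem.List.min?_isMin hm
  have hMge : ∀ y ∈ l, y ≤ M := PySem.List.max?_isMax hM
  have hvl : l[i] ∈ l := List.getElem_mem hi
  have hv1 : 1 ≤ l[i] := hpos _ hvl
  have hsum := pv_sum_decomp l i hi
  have hlen := pv_len_decomp l i hi
  have hsplit : ∀ y ∈ l, y = l[i] ∨ y ∈ l.take i ++ l.drop (i + 1) := by
    intro y hy
    rw [pv_decomp l i hi] at hy
    simp only [List.mem_append, List.mem_cons] at hy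
    rcases hy with h' | h' | h'
    · exact Or.inr (List.mem_append.mpr (Or.inl h'))
    · exact Or.inl h'
    · exact Or.inr (List.mem_append.mpr (Or.inr h'))
  by_cases hone : l[i] = 1
  · rw [pv_modA_erase l i hi hone] at hEq
    cases hE : (l.take i ++ l.drop (i + 1)) with
    | nil =>
      left
      have hl1 : l.length = 1 := by
        rw [← hlen, hE]
        rfl
      obtain ⟨a, ha⟩ := List.length_eq_one_iff.mp hl1
      have hma : m = a := by
        have := hmmem; rw [ha] at this; simpa using this
      have hMa : M = a := by
        have := hMmem; rw [ha] at this; simpa using this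
      exact ⟨hma.trans hMa.symm, Or.inr (by rw [hl1]; norm_num)⟩
    | cons x rest =>
      have hx : x ∈ l.take i ++ l.drop (i + 1) := by
        rw [hE]; exact List.mem_cons_self
      have hall : ∀ y ∈ l.take i ++ l.drop (i + 1), y = x := by
        intro y hy
        exact hEq y hy x hx
      have hxl : x ∈ l := pv_mem_parts l i hi hx
      have hx1 : 1 ≤ x := hpos x hxl
      by_cases hxone : x = 1
      · have hall1 : ∀ y ∈ l, y = 1 := by
          intro y hy
          rcases hsplit y hy with h' | h'
          · rw [h', hone]
          · rw [hall y h', hxone]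
        exact Or.inl ⟨by rw [hall1 m hmmem, hall1 M hMmem], Or.inl (hall1 m hmmem)⟩
      · right; left
        have hm1 : m = 1 := le_antisymm (by have := hmle _ hvl; omega) (hpos m hmmem)
        have hMx : M = x := by
          have h1 : x ≤ M := hMge x hxl
          rcases hsplit M hMmem with h2 | h2
          · omega
          · exact (hall M h2)
        have hsum2 : (l.take i ++ l.drop (i + 1)).sum
            = x * ((l.take i ++ l.drop (i + 1)).length : Int) := pv_sum_of_all_eq _ x hall
        refine ⟨hm1, ?_⟩
        rw [hMx]
        have hc : (((l.take i ++ l.drop (i + 1)).length : Nat) : Int) = (l.length : Int) - 1 := by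
          omega
        rw [← hc]
        linarith [hsum, hsum2]
  · rw [pv_modA_set l i hi hone] at hEq
    have hv1m : (l[i] - 1) ∈ l.take i ++ (l[i] - 1) :: l.drop (i + 1) := by simp
    have hall : ∀ y ∈ l.take i ++ (l[i] - 1) :: l.drop (i + 1), y = l[i] - 1 :=
      fun y hy => hEq y hy _ hv1m
    cases hE : (l.take i ++ l.drop (i + 1)) with
    | nil =>
      left
      have hl1 : l.length = 1 := by
        rw [← hlen, hE]
        rfl
      obtain ⟨a, ha⟩ := List.length_eq_one_iff.mp hl1
      have hma : m = a := by
        have := hmmem; rw [ha] at this; simpa using this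
      have hMa : M = a := by
        have := hMmem; rw [ha] at this; simpa using this
      exact ⟨hma.trans hMa.symm, Or.inr (by rw [hl1]; norm_num)⟩
    | cons x rest =>
      right; right
      have hx : x ∈ l.take i ++ l.drop (i + 1) := by
        rw [hE]; exact List.mem_cons_self
      have hpartmod : ∀ z, z ∈ l.take i ++ l.drop (i + 1) →
          z ∈ l.take i ++ (l[i] - 1) :: l.drop (i + 1) := by
        intro z hz
        rcases List.mem_append.mp hz with h' | h'
        · exact List.mem_append.mpr (Or.inl h')
        · exact List.mem_append.mpr (Or.inr (List.mem_cons_of_mem _ h'))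
      have hxv : x = l[i] - 1 := hall x (hpartmod x hx)
      have hxl : x ∈ l := pv_mem_parts l i hi hx
      have hsplit2 : ∀ y ∈ l, y = l[i] ∨ y = l[i] - 1 := by
        intro y hy
        rcases hsplit y hy with h' | h'
        · exact Or.inl h'
        · exact Or.inr (hall y (hpartmod y h'))
      have hm' : m = l[i] - 1 := by
        have h1 : m ≤ x := hmle x hxl
        rcases hsplit2 m hmmem with h2 | h2 <;> omega
      have hM' : M = l[i] := by
        have h1 : l[i] ≤ M := hMge _ hvl
        rcases hsplit2 M hMmem with h2 | h2 <;> omega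
      refine ⟨by omega, ?_⟩
      have hsum2 : (l.take i ++ (l[i] - 1) :: l.drop (i + 1)).sum
          = (l[i] - 1) * ((l.take i ++ (l[i] - 1) :: l.drop (i + 1)).length : Int) :=
        pv_sum_of_all_eq _ _ hall
      rw [hM', hm']
      simp only [List.sum_append, List.sum_cons, List.length_append, List.length_cons] at hsum2 hsum hlen
      have hcL : (l.length : Int) = ((l.take i).length : Int) + ((l.drop (i + 1)).length : Int) + 1 := by
        omega
      push_cast at hsum2
      linear_combination hsum + hsum2 - (l[i] - 1) * hcL

-- Backward: B's closed-form condition produces a successful trial index.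
lemma pv_core_bwd (l : List Int) (hpos : ∀ x ∈ l, (1 : Int) ≤ x) (m M : Int)
    (hm : PySem.List.min? l (fun x => x) = some m)
    (hM : PySem.List.max? l (fun x => x) = some M)
    (hB : (m = M ∧ (m = 1 ∨ (l.length : Int) = 1)) ∨
          (m = 1 ∧ l.sum - 1 = M * ((l.length : Int) - 1)) ∨
          (M = m + 1 ∧ l.sum = M + m * ((l.length : Int) - 1))) :
    ∃ i, i < l.length ∧ pvAllEq (pvModA l i) := by
  have hmmem : m ∈ l := PySem.List.min?_mem hm
  have hMmem : M ∈ l := PySem.List.max?_mem hM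
  have hmle : ∀ y ∈ l, m ≤ y := PySem.List.min?_isMin hm
  have hMge : ∀ y ∈ l, y ≤ M := PySem.List.max?_isMax hM
  rcases hB with ⟨hmM, hc⟩ | ⟨hm1, hs⟩ | ⟨hMm, hs⟩
  · rcases hc with hm1 | hn1
    · -- all frequencies are 1: remove any letter
      have hall : ∀ y ∈ l, y = 1 := by
        intro y hy
        have h1 := hMge y hy
        have h2 := hpos y hy
        omega
      have h0 : 0 < l.length := List.length_pos_of_mem hmmem
      refine ⟨0, h0, ?_⟩
      rw [pv_modA_erase l 0 h0 (hall _ (List.getElem_mem h0))]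
      exact pv_allEq_const _ 1 (fun y hy => hall y (pv_mem_parts l 0 h0 hy))
    · -- a single distinct letter: remove it once
      have h1 : l.length = 1 := by exact_mod_cast hn1
      obtain ⟨a, rfl⟩ := List.length_eq_one_iff.mp h1
      refine ⟨0, by simp, ?_⟩
      by_cases ha : a = 1
      · rw [pv_modA_erase _ 0 (by simp) (by simpa using ha)]
        intro x hx
        simp at hx
      · rw [pv_modA_set _ 0 (by simp) (by simpa using ha)]
        intro x hx y hy
        simp at hx hy
        rw [hx, hy]
  · -- one letter with frequency 1, all others share the max frequency
    obtain ⟨i, hi, hvi⟩ := List.mem_iff_getElem.mp hmmem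
    refine ⟨i, hi, ?_⟩
    rw [pv_modA_erase l i hi (by rw [hvi, hm1])]
    apply pv_allEq_const _ M
    apply pv_all_eq_of_le _ _ (fun y hy => hMge y (pv_mem_parts l i hi hy))
    have hsum := pv_sum_decomp l i hi
    have hlen := pv_len_decomp l i hi
    have hvi1 : l[i] = 1 := by rw [hvi, hm1]
    have hc : (((l.take i ++ l.drop (i + 1)).length : Nat) : Int) = (l.length : Int) - 1 := by
      omega
    rw [hc]
    linarith [hs, hsum]
  · -- one letter exceeds the common frequency by exactly one
    obtain ⟨i, hi, hvi⟩ := List.mem_iff_getElem.mp hMmem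
    have hm1 : 1 ≤ m := hpos m hmmem
    refine ⟨i, hi, ?_⟩
    rw [pv_modA_set l i hi (by rw [hvi]; omega)]
    apply pv_allEq_const _ m
    apply pv_all_eq_of_ge
    · intro y hy
      rcases List.mem_append.mp hy with h' | h'
      · exact hmle y (List.mem_of_mem_take h')
      · rcases List.mem_cons.mp h' with rfl | h''
        · omega
        · exact hmle y (List.mem_of_mem_drop h'')
    · have hsum := pv_sum_decomp l i hi
      have hlen := pv_len_decomp l i hi
      simp only [List.sum_append, List.sum_cons, List.length_append, List.length_cons] at hsum hlen ⊢
      have hcL : (l.length : Int) = ((l.take i).length : Int) + ((l.drop (i + 1)).length : Int) + 1 := by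
        omega
      rw [hvi, hMm] at hsum ⊢
      push_cast
      linear_combination hs - hsum + m * hcL + hMm

-- The heart: A's existential trial loop matches B's closed-form condition.
lemma pv_core (l : List Int) (hpos : ∀ x ∈ l, (1 : Int) ≤ x) (m M : Int)
    (hm : PySem.List.min? l (fun x => x) = some m)
    (hM : PySem.List.max? l (fun x => x) = some M) :
    ((∃ i, i < l.length ∧ pvAllEq (pvModA l i)) ↔
      ((m = M ∧ (m = 1 ∨ (l.length : Int) = 1)) ∨
       (m = 1 ∧ l.sum - 1 = M * ((l.length : Int) - 1)) ∨
       (M = m + 1 ∧ l.sum = M + m * ((l.length : Int) - 1)))) :=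
  ⟨fun ⟨i, hi, hEq⟩ => pv_core_fwd l hpos m M hm hM i hi hEq,
   pv_core_bwd l hpos m M hm hM⟩

-- ===== VERDICT (by name: the statement is the Claim_ definition above) =====
theorem equalFrequency_spec : Claim_equal_equalFrequency := by
  intro word _
  show equalFrequency word = equalFrequency_alt word
  have hfold : word.toList.foldl
      (fun h letter => (h.setdefault letter (0 : Int)).insert letter
        ((h.setdefault letter (0 : Int)).getD letter 0 + 1))
      PySem.Dict.empty = PySem.Dict.counter word.toList := by
    rw [PySem.List.foldl_congr_mem _ _ (fun h ch => h.insert ch (h.getD ch (0 : Int) + 1)) _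
        (fun acc x _ => pv_step_eq acc x)]
    exact PySem.Dict.foldl_insert_getD_add_one_eq_counter _
  simp only [equalFrequency, equalFrequency_alt]
  rw [hfold, PySem.Dict.foldl_insert_getD_add_one_eq_counter]
  have hpos := pv_vals_pos word.toList
  set L := (PySem.Dict.counter word.toList).values with hLdef
  by_cases hnil : L = []
  · rw [hnil]
    simp
  · obtain ⟨m, hm⟩ : ∃ m, PySem.List.min? L (fun x => x) = some m := by
      cases h : PySem.List.min? L (fun x => x) with
      | none => exact absurd ((PySem.List.min?_eq_none_iff L _).mp h) hnil
      | some m => exact ⟨m, rfl⟩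
    obtain ⟨M, hM⟩ : ∃ M, PySem.List.max? L (fun x => x) = some M := by
      cases h : PySem.List.max? L (fun x => x) with
      | none => exact absurd ((PySem.List.max?_eq_none_iff L _).mp h) hnil
      | some M => exact ⟨M, rfl⟩
    rw [hm, hM]
    have hn0 : ((L.length : Int) == 0) = false := by
      simp only [beq_eq_false_iff_ne, ne_eq]
      intro h
      exact hnil (List.length_eq_zero_iff.mp (by exact_mod_cast h))
    rw [hn0]
    simp only [Option.getD_some, Bool.false_eq_true, if_false]
    have hfun : (fun i => pvAllEqualA (pvModA L i))
        = (fun i => pvAllEqualA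
            (if (L.set i (L.getD i 0 - 1)).getD i 0 == 0 then (L.set i (L.getD i 0 - 1)).eraseIdx i
             else L.set i (L.getD i 0 - 1))) := rfl
    rw [← hfun]
    rw [Bool.eq_iff_iff]
    simp only [List.any_eq_true, List.mem_range, pvAllEqualA_iff,
      Bool.or_eq_true, Bool.and_eq_true, beq_iff_eq]
    rw [show (∃ i, i < L.length ∧ pvAllEq (pvModA L i)) ↔ _ from pv_core L hpos m M hm hM]
    exact or_assoc.symm
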